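-- pv_equiv track=rewrite | github.com/dmarek03/INTRODUCTION_TO_COMPUTER_SCIENCE | ZESTAW_4/ZAD_15.py | has_prime_digits
-- ===== SOURCE A (Python) =====
-- def has_prime_digits(n: int) -> bool:
--     n_abs = abs(n)
--     while n_abs > 1:
--         d = n_abs % 10
--         if d in [2, 3, 5, 7]:
--             return True
--         n_abs //= 10
--     return False
-- ===== SOURCE B (Python) =====
-- def has_prime_digits(n: int) -> bool:
--     return bool(set(str(abs(n))) & {'2', '3', '5', '7'})
-- ===== Notes on version B (the rewrite author's own statement) =====
-- stated objective: idiomatic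
-- what changed: Replaces the arithmetic remainder/quotient digit-extraction loop (with early exit) by converting the number to its decimal string once and intersecting the set of its digit characters with the prime-digit character set.
import Mathlib
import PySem

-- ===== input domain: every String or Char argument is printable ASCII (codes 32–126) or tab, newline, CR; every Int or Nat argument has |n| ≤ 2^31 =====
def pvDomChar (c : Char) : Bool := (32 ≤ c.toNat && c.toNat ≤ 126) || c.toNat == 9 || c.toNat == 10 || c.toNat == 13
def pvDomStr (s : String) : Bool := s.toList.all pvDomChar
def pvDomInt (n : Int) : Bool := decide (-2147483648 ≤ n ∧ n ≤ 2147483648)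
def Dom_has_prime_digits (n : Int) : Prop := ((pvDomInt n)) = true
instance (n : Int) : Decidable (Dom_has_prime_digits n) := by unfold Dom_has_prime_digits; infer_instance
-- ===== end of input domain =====

-- B replaces A's arithmetic digit-extraction loop (with early exit) by one str(abs(n))
-- conversion and a set intersection with the prime-digit characters; return value only, no side effects.

-- ===== PORT A =====
-- A's while loop, digit by digit (least significant first)
def pvLoopA (m : Int) : Bool :=
  if 1 < m then
    if PySem.Int.mod m 10 ∈ ([2, 3, 5, 7] : List Int) then true
    else pvLoopA (PySem.Int.floordiv m 10)
  else false
termination_by m.toNat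
decreasing_by
  rw [PySem.Int.floordiv_eq_ediv_of_pos (by norm_num)]
  omega

def has_prime_digits (n : Int) : Bool :=
  pvLoopA (if n < 0 then -n else n)

-- ===== PORT B =====
-- bool(set(str(abs(n))) & {'2','3','5','7'})
def has_prime_digits_alt (n : Int) : Bool :=
  !(PySem.Set.inter (PySem.Set.ofList (PySem.Int.toStr (if n < 0 then -n else n)).toList)
      (PySem.Set.ofList ['2', '3', '5', '7'])).isEmpty

-- ===== PRECONDITION & SPEC =====
def Spec_has_prime_digits (n : Int) (out : Bool) : Prop := out = has_prime_digits_alt n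
instance (n : Int) (out : Bool) : Decidable (Spec_has_prime_digits n out) := by unfold Spec_has_prime_digits; infer_instance

-- ===== CLAIM (what is proved, stated in full; the proofs are below) =====
def Claim_equal_has_prime_digits : Prop := ∀ (n : Int), Dom_has_prime_digits n → Spec_has_prime_digits n (has_prime_digits n)

-- ===== LEMMAS AND PROOFS =====

-- A's loop computes "some decimal digit of m is 2, 3, 5 or 7"
theorem pvLoopA_eq (m : Nat) :
    pvLoopA (m : Int) = decide (∃ d ∈ Nat.digits 10 m, d ∈ ([2, 3, 5, 7] : List Nat)) := by
  induction m using Nat.strong_induction_on with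
  | _ m ih =>
    rw [pvLoopA]
    by_cases h1 : 1 < m
    · rw [Nat.digits_def' (by norm_num : 1 < (10 : Nat)) (by omega)]
      have hm : (1 : Int) < (m : Int) := by exact_mod_cast h1
      rw [if_pos hm]
      rw [show PySem.Int.mod (m : Int) 10 = ((m % 10 : Nat) : Int) from
        PySem.Int.mod_natCast m 10]
      rw [show PySem.Int.floordiv (m : Int) 10 = ((m / 10 : Nat) : Int) from
        PySem.Int.floordiv_natCast m 10]
      rw [ih (m / 10) (by omega)]
      by_cases hmem : m % 10 ∈ ([2, 3, 5, 7] : List Nat)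
      · have hmi : ((m % 10 : Nat) : Int) ∈ ([2, 3, 5, 7] : List Int) := by
          simp only [List.mem_cons, List.not_mem_nil, or_false] at hmem ⊢
          omega
        rw [if_pos hmi]
        simp only [List.mem_cons, List.not_mem_nil, or_false] at hmem
        simp
        exact Or.inl hmem
      · have hmi : ((m % 10 : Nat) : Int) ∉ ([2, 3, 5, 7] : List Int) := by
          simp only [List.mem_cons, List.not_mem_nil, or_false] at hmem ⊢
          omega
        rw [if_neg hmi]
        simp only [List.mem_cons, List.not_mem_nil, or_false] at hmem
        simp
        exact fun h => absurd h hmem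
    · have : m = 0 ∨ m = 1 := by omega
      rcases this with rfl | rfl <;> simp

-- core's toDigitsCore, with enough fuel and a positive argument, is the reversed digit list
theorem toDigitsCore_eq_digits : ∀ (f n : Nat) (l : List Char), n < f → 0 < n →
    Nat.toDigitsCore 10 f n l = ((Nat.digits 10 n).map Nat.digitChar).reverse ++ l := by
  intro f
  induction f with
  | zero => intro n l hf; omega
  | succ f ih =>
    intro n l hf hn
    simp only [Nat.toDigitsCore]
    by_cases h0 : n / 10 = 0
    · rw [if_pos h0]
      rw [Nat.digits_def' (by norm_num : 1 < (10 : Nat)) hn]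
      rw [show Nat.digits 10 (n / 10) = [] by rw [h0]; simp]
      simp
    · rw [if_neg h0]
      rw [ih (n / 10) ((n % 10).digitChar :: l) (by omega) (by omega)]
      rw [Nat.digits_def' (by norm_num : 1 < (10 : Nat)) hn]
      simp

-- membership in set(cs) & primes characterised
theorem mem_interB (cs : List Char) (c : Char) :
    c ∈ PySem.Set.inter (PySem.Set.ofList cs) (PySem.Set.ofList ['2', '3', '5', '7']) ↔
      c ∈ cs ∧ c ∈ (['2', '3', '5', '7'] : List Char) := by
  simp [PySem.Set.inter, List.mem_filter, PySem.Set.mem_ofList, PySem.Set.contains]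

-- "the intersection is non-empty", as B computes it, is "some character is a prime digit char"
theorem boolB (cs : List Char) :
    (!(PySem.Set.inter (PySem.Set.ofList cs)
        (PySem.Set.ofList ['2', '3', '5', '7'])).isEmpty)
      = decide (∃ c ∈ cs, c ∈ (['2', '3', '5', '7'] : List Char)) := by
  by_cases hP : ∃ c ∈ cs, c ∈ (['2', '3', '5', '7'] : List Char)
  · obtain ⟨c, hc1, hc2⟩ := hP
    have hne := List.ne_nil_of_mem ((mem_interB cs c).mpr ⟨hc1, hc2⟩)
    rw [show (PySem.Set.inter (PySem.Set.ofList cs)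
        (PySem.Set.ofList ['2', '3', '5', '7'])).isEmpty = false from
      by simpa [List.isEmpty_iff] using hne]
    simp only [Bool.not_false]
    exact (decide_eq_true ⟨c, hc1, hc2⟩).symm
  · have hnil : PySem.Set.inter (PySem.Set.ofList cs)
        (PySem.Set.ofList ['2', '3', '5', '7']) = [] := by
      rw [List.eq_nil_iff_forall_not_mem]
      intro c hc
      exact hP ⟨c, ((mem_interB cs c).mp hc).1, ((mem_interB cs c).mp hc).2⟩
    rw [hnil]
    simp only [List.isEmpty_nil, Bool.not_true]
    exact (decide_eq_false hP).symm

-- a digit below 10 maps to a prime-digit character iff it is 2, 3, 5 or 7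
theorem digitChar_prime (d : Nat) (hd : d < 10) :
    d.digitChar ∈ (['2', '3', '5', '7'] : List Char) ↔ d ∈ ([2, 3, 5, 7] : List Nat) := by
  interval_cases d <;> decide

theorem main_eq (n : Int) : has_prime_digits n = has_prime_digits_alt n := by
  unfold has_prime_digits has_prime_digits_alt
  rw [boolB]
  have ha0 : 0 ≤ (if n < 0 then -n else n) := by split <;> omega
  generalize (if n < 0 then -n else n) = a at *
  obtain ⟨m, rfl⟩ : ∃ m : Nat, a = (m : Int) := ⟨a.toNat, by omega⟩
  rw [pvLoopA_eq]
  have hchars : (PySem.Int.toStr (m : Int)).toList = Nat.toDigits 10 m := by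
    rw [PySem.Int.toList_toStr]
    simp [PySem.Int.toChars, show ¬ ((m : Int) < 0) by omega]
  rw [hchars]
  rcases Nat.eq_zero_or_pos m with rfl | hm
  · simp [Nat.toDigits, Nat.toDigitsCore]
    decide
  · rw [show Nat.toDigits 10 m = Nat.toDigitsCore 10 (m + 1) m [] from rfl]
    rw [toDigitsCore_eq_digits (m + 1) m [] (by omega) hm]
    simp only [List.append_nil, List.mem_reverse, List.mem_map]
    congr 1
    apply propext
    constructor
    · rintro ⟨d, hd, hdp⟩
      exact ⟨d.digitChar, ⟨d, hd, rfl⟩,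
        (digitChar_prime d (Nat.digits_lt_base (by norm_num) hd)).mpr hdp⟩
    · rintro ⟨c, ⟨d, hd, rfl⟩, hcp⟩
      exact ⟨d, hd, (digitChar_prime d (Nat.digits_lt_base (by norm_num) hd)).mp hcp⟩

-- ===== VERDICT (by name: the statement is the Claim_ definition above) =====
theorem has_prime_digits_spec : Claim_equal_has_prime_digits := by
  intro n _
  exact main_eq n
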